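-- pv_equiv track=rewrite | github.com/kiipo0623/Algorithm-2022 | 0504/2021 blind/1.py | solution
-- ===== SOURCE A (Python) =====
-- from collections import deque
--
-- def solution(new_id):
--     answer = ''
--     # 1단계
--     new_id = new_id.lower()
--     # 2단계
--     new_id = deque(new_id)
--     leng = len(new_id)
--     for _ in range(leng):
--         now = new_id.popleft()
--         if now.isalnum():
--             new_id.append(now)
--         elif now in ['-', '_', '.']:
--             new_id.append(now)
--     new_id = ''.join(list(new_id))
--     # 3단계
--     while ".." in new_id:
--         new_id = new_id.replace('..', '.')
--     # 4단계
--     if len(new_id) and new_id[0] == '.':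
--         new_id = new_id[1:]
--     if len(new_id) and new_id[-1] == '.':
--         new_id = new_id[:-1]
--     # 5단계
--     if len(new_id) == 0:
--         new_id = 'a'
--     # 6
--     if len(new_id) >= 16:
--         new_id = new_id[:15]
--         if new_id[-1] == '.':
--             new_id = new_id[:-1]
--     # 7
--     if len(new_id) <= 2:
--         last = new_id[-1]
--         long = 3-len(new_id)
--         new_id += last*long
--
--     return new_id
-- ===== SOURCE B (Python) =====
-- def solution(new_id):
--     out = []
--     for c in new_id.lower():
--         if c.isalnum() or c in '-_':
--             out.append(c)
--         elif c == '.' and (not out or out[-1] != '.'):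
--             out.append(c)
--     if out and out[0] == '.':
--         out.pop(0)
--     if out and out[-1] == '.':
--         out.pop()
--     if not out:
--         out = ['a']
--     if len(out) >= 16:
--         out = out[:15]
--         if out[-1] == '.':
--             out.pop()
--     if len(out) <= 2:
--         out += [out[-1]] * (3 - len(out))
--     return ''.join(out)
-- ===== Notes on version B (the rewrite author's own statement) =====
-- stated objective: faster
-- what changed: One left-to-right pass that lowercases, filters allowed characters and skips a dot that would follow a dot, replacing A's deque rotation pass plus the repeated replace('..','.') scans and the separate strip/truncate slicing.
import Mathlib
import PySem

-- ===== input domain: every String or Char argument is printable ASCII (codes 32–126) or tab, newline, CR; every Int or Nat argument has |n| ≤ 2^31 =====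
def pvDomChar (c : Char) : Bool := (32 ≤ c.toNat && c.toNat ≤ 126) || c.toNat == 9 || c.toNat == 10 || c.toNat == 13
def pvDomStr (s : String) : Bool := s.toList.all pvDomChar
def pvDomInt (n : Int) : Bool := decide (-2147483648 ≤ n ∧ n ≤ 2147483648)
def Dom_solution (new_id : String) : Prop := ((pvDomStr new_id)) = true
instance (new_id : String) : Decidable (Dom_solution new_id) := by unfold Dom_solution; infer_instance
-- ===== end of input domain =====

-- B replaces A's deque rotation pass and repeated replace('..','.') scans by one
-- left-to-right filter-and-collapse pass (objective: faster, as measured by the check).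

-- ===== PORT A =====

-- A step 2: the deque loop — popleft len(new_id) times, conditionally append at the back
def pvDeqLoop : Nat → List Char → List Char
  | 0, dq => dq
  | _ + 1, [] => []           -- unreachable: the loop runs exactly the initial length many times
  | n + 1, now :: rest =>
    if PySem.Chars.isalnum now then pvDeqLoop n (rest ++ [now])
    else if ['-', '_', '.'].contains now then pvDeqLoop n (rest ++ [now])
    else pvDeqLoop n rest

-- structural form of one replace('..','.') pass, used only to justify step 3's termination
-- (and reused by the proofs below)
def pvRep2 : List Char → List Char
  | [] => []
  | [c] => [c]
  | c :: b :: t => if c = '.' ∧ b = '.' then '.' :: pvRep2 t else c :: pvRep2 (b :: t)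

-- structural form of '".." in s', used only for step 3's termination (and the proofs below)
def pvHasDD : List Char → Bool
  | c :: b :: t => if c = '.' ∧ b = '.' then true else pvHasDD (b :: t)
  | _ => false

theorem pvReplaceGo_eq (fuel : Nat) : ∀ (l acc : List Char), l.length ≤ fuel →
    PySem.Chars.replace.go ['.', '.'] ['.'] fuel l acc = acc.reverse ++ pvRep2 l := by
  induction fuel with
  | zero =>
    intro l acc h
    have hl : l = [] := by cases l <;> simp_all
    subst hl
    simp [PySem.Chars.replace.go, pvRep2]
  | succ n ih =>
    intro l acc h
    match l with
    | [] => simp [PySem.Chars.replace.go, pvRep2]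
    | [c] =>
      rw [PySem.Chars.replace.go]
      have hp : List.isPrefixOf ['.', '.'] [c] = false := by simp [List.isPrefixOf]
      rw [hp]
      simp only [Bool.false_eq_true, if_false]
      rw [ih [] (c :: acc) (by simp)]
      simp [pvRep2]
    | c :: b :: t =>
      rw [PySem.Chars.replace.go]
      by_cases hcb : c = '.' ∧ b = '.'
      · obtain ⟨rfl, rfl⟩ := hcb
        have hp : List.isPrefixOf ['.', '.'] ('.' :: '.' :: t) = true := by
          simp [List.isPrefixOf]
        rw [hp]
        simp only [if_true]
        rw [ih (List.drop (['.', '.'] : List Char).length ('.' :: '.' :: t)) _ (by simp at h ⊢; omega)]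
        simp [pvRep2]
      · have hp : List.isPrefixOf ['.', '.'] (c :: b :: t) = false := by
          simp [List.isPrefixOf]
          intro h1 h2; exact hcb ⟨h1.symm, h2.symm⟩
        rw [hp]
        simp only [Bool.false_eq_true, if_false]
        rw [ih (b :: t) (c :: acc) (by simp at h ⊢; omega)]
        rw [pvRep2, if_neg hcb]
        simp

theorem pvReplace_eq (s : List Char) :
    PySem.Chars.replace s ['.', '.'] ['.'] = pvRep2 s := by
  rw [PySem.Chars.replace]
  simp only [List.isEmpty, Bool.false_eq_true, if_false]
  exact pvReplaceGo_eq s.length s [] (le_refl _)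

theorem pvHasDD_iff (s : List Char) : pvHasDD s = true ↔ ['.', '.'] <:+: s := by
  induction s with
  | nil => simp [pvHasDD]
  | cons c t ih =>
    cases t with
    | nil =>
      constructor
      · intro h
        have : pvHasDD [c] = false := by rw [pvHasDD.eq_def]
        rw [this] at h; exact Bool.noConfusion h
      · intro h; have := h.length_le; simp at this
    | cons b u =>
      rw [pvHasDD]
      by_cases hcb : c = '.' ∧ b = '.'
      · obtain ⟨rfl, rfl⟩ := hcb
        
        constructor
        · intro _; exact ⟨[], u, rfl⟩
        · intro _; rfl
      · rw [if_neg hcb, ih]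
        constructor
        · intro h; exact List.infix_cons h
        · rintro ⟨pre, post, hpre⟩
          cases pre with
          | nil =>
            simp only [List.nil_append, List.cons_append, List.cons.injEq] at hpre
            exact absurd ⟨hpre.1.symm, hpre.2.1.symm⟩ hcb
          | cons p ps =>
            simp only [List.cons_append, List.cons.injEq] at hpre
            exact ⟨ps, post, hpre.2⟩

theorem pvIsIn_eq (s : List Char) : PySem.Chars.isIn ['.', '.'] s = pvHasDD s := by
  by_cases h : pvHasDD s = true
  · rw [h, (PySem.Chars.isIn_iff_infix _ _).mpr ((pvHasDD_iff s).mp h)]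
  · simp only [Bool.not_eq_true] at h
    rw [h, PySem.Chars.isIn_eq_false_iff]
    intro hinf
    rw [(pvHasDD_iff s).mpr hinf] at h
    exact Bool.noConfusion h

theorem pvRep2_length_le (s : List Char) : (pvRep2 s).length ≤ s.length := by
  induction s using pvRep2.induct with
  | case1 => simp [pvRep2]
  | case2 c => simp [pvRep2]
  | case3 c b t hcb ih =>
    rw [pvRep2, if_pos hcb]
    simp at ih ⊢; omega
  | case4 c b t hcb ih =>
    rw [pvRep2, if_neg hcb]
    simp at ih ⊢; omega

theorem pvRep2_length_lt (s : List Char) (h : pvHasDD s = true) :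
    (pvRep2 s).length < s.length := by
  induction s using pvRep2.induct with
  | case1 =>
    have : pvHasDD [] = false := by rw [pvHasDD.eq_def]
    rw [this] at h; exact Bool.noConfusion h
  | case2 c =>
    have : pvHasDD [c] = false := by rw [pvHasDD.eq_def]
    rw [this] at h; exact Bool.noConfusion h
  | case3 c b t hcb _ =>
    rw [pvRep2, if_pos hcb]
    have := pvRep2_length_le t
    simp; omega
  | case4 c b t hcb ih =>
    rw [pvHasDD, if_neg hcb] at h
    rw [pvRep2, if_neg hcb]
    have := ih h
    simp at this ⊢; omega

-- A step 3: while '..' in new_id: new_id = new_id.replace('..', '.')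
def pvStep3 (s : List Char) : List Char :=
  if h : PySem.Chars.isIn ['.', '.'] s = true then pvStep3 (PySem.Chars.replace s ['.', '.'] ['.'])
  else s
termination_by s.length
decreasing_by
  rw [pvReplace_eq]
  exact pvRep2_length_lt s (by rwa [pvIsIn_eq] at h)

def solution (new_id : String) : String :=
  -- step 1
  let s1 := PySem.Chars.lower new_id.toList
  -- step 2 (deque loop)
  let s2 := pvDeqLoop s1.length s1
  -- step 3
  let s3 := pvStep3 s2
  -- step 4
  let s4 := if s3.length != 0 && (PySem.List.pyGet? s3 0 == some '.') then PySem.List.slice s3 (some 1) none else s3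
  let s5 := if s4.length != 0 && (PySem.List.pyGet? s4 (-1) == some '.') then PySem.List.slice s4 none (some (-1)) else s4
  -- step 5
  let s6 := if s5.length == 0 then ['a'] else s5
  -- step 6
  let s7 := if 16 ≤ s6.length then
      (let t := PySem.List.slice s6 none (some 15)
       if PySem.List.pyGet? t (-1) == some '.' then PySem.List.slice t none (some (-1)) else t)
    else s6
  -- step 7 (new_id[-1] cannot raise here: step 5 guarantees non-empty, so .getD is never used)
  let s8 := if s7.length ≤ 2 then
      (let last := (PySem.List.pyGet? s7 (-1)).getD 'a'
       s7 ++ PySem.List.pyRepeat [last] (3 - (s7.length : Int)))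
    else s7
  String.ofList s8

-- ===== PORT B =====

-- B's single pass: keep an allowed character; keep '.' only when the output so far
-- is empty or does not already end in '.'
def pvScanStep (out : List Char) (c : Char) : List Char :=
  if PySem.Chars.isalnum c || PySem.Chars.isIn [c] ['-', '_'] then out ++ [c]
  else if c == '.' && (out.isEmpty || out.getLast? != some '.') then out ++ [c]
  else out

def solution_alt (new_id : String) : String :=
  let out := (PySem.Chars.lower new_id.toList).foldl pvScanStep []
  let out := if !out.isEmpty && (out.head? == some '.') then out.tail else out
  let out := if !out.isEmpty && (out.getLast? == some '.') then out.dropLast else out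
  let out := if out.isEmpty then ['a'] else out
  let out := if 16 ≤ out.length then
      (let t := out.take 15
       if t.getLast? == some '.' then t.dropLast else t)
    else out
  let out := if out.length ≤ 2 then out ++ List.replicate (3 - out.length) (out.getLastD 'a') else out
  String.ofList out

-- ===== PRECONDITION & SPEC =====
def Spec_solution (new_id : String) (out : String) : Prop := out = solution_alt new_id
instance (new_id : String) (out : String) : Decidable (Spec_solution new_id out) := by unfold Spec_solution; infer_instance

-- ===== CLAIM (what is proved, stated in full; the proofs are below) =====
def Claim_equal_solution : Prop := ∀ (new_id : String), Dom_solution new_id → Spec_solution new_id (solution new_id)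

-- ===== LEMMAS AND PROOFS =====

def pvKeep (c : Char) : Bool :=
  PySem.Chars.isalnum c || ['-', '_', '.'].contains c

-- collapse of consecutive dots, recursing on the tail (keeps the last dot of each run)
def pvSq : List Char → List Char
  | [] => []
  | c :: t => if c = '.' ∧ t.head? = some '.' then pvSq t else c :: pvSq t

-- collapse with a flag "the previously emitted character was a dot" (keeps the first dot)
def pvSqA : Bool → List Char → List Char
  | _, [] => []
  | d, c :: t => if c = '.' then (if d then pvSqA true t else '.' :: pvSqA true t) else c :: pvSqA false t

theorem pvDeqLoop_eq (xs : List Char) : ∀ ys, pvDeqLoop xs.length (xs ++ ys) = ys ++ xs.filter pvKeep := by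
  induction xs with
  | nil => intro ys; simp [pvDeqLoop]
  | cons x xs ih =>
    intro ys
    simp only [List.length_cons, List.cons_append, pvDeqLoop]
    by_cases h1 : PySem.Chars.isalnum x = true
    · rw [if_pos h1, List.append_assoc, ih (ys ++ [x])]
      simp [pvKeep, h1]
    · rw [if_neg (by simp [h1])]
      by_cases h2 : (['-', '_', '.'] : List Char).contains x = true
      · rw [if_pos h2, List.append_assoc, ih (ys ++ [x])]
        have hk : pvKeep x = true := by simp [pvKeep]; simp at h2; tauto
        simp [hk]
      · rw [if_neg (by simp_all), ih ys]
        have hk : pvKeep x = false := by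
          simp [pvKeep]; simp at h1 h2; tauto
        simp [hk]

theorem pvHead?_rep2 (s : List Char) : (pvRep2 s).head? = s.head? := by
  induction s using pvRep2.induct with
  | case1 => rfl
  | case2 c => rfl
  | case3 c b t hcb _ => rw [pvRep2, if_pos hcb]; simp [hcb.1]
  | case4 c b t hcb _ => rw [pvRep2, if_neg hcb]; rfl

theorem pvSq_rep2 (s : List Char) : pvSq (pvRep2 s) = pvSq s := by
  induction s using pvRep2.induct with
  | case1 => rfl
  | case2 c => rfl
  | case3 c b t hcb ih =>
    obtain ⟨rfl, rfl⟩ := hcb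
    rw [pvRep2, if_pos ⟨rfl, rfl⟩, pvSq, pvSq, pvSq]
    simp only [List.head?_cons, pvHead?_rep2, ih]
    simp
  | case4 c b t hcb ih =>
    rw [pvRep2, if_neg hcb]
    rw [pvSq, pvSq]
    have hb : (pvRep2 (b :: t)).head? = some b := by rw [pvHead?_rep2]; rfl
    have hcond : (c = '.' ∧ (pvRep2 (b :: t)).head? = some '.') ↔ (c = '.' ∧ (some b : Option Char) = some '.') := by
      rw [hb]
    by_cases hc : c = '.' ∧ b = '.'
    · exact absurd hc hcb
    · rw [if_neg (by rw [hcond]; simp; intro h1 h2; exact hcb ⟨h1, h2⟩),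
          if_neg (by simp; intro h1 h2; exact hcb ⟨h1, h2⟩), ih]

theorem pvSq_of_no_dd (s : List Char) (h : pvHasDD s = false) : pvSq s = s := by
  induction s using pvHasDD.induct with
  | case1 c b t hcb =>
    rw [pvHasDD, if_pos hcb] at h; exact Bool.noConfusion h
  | case2 c b t hcb ih =>
    rw [pvHasDD, if_neg hcb] at h
    rw [pvSq, if_neg (by simp; intro h1 h2; exact hcb ⟨h1, h2⟩), ih h]
  | case3 t ht =>
    cases t with
    | nil => rfl
    | cons c u =>
      cases u with
      | nil => rw [pvSq]; simp [pvSq]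
      | cons b v => exact absurd rfl (ht c b v)

theorem pvStep3_eq (s : List Char) : pvStep3 s = pvSq s := by
  induction s using pvStep3.induct with
  | case1 s h ih => rw [pvStep3, dif_pos h, ih, pvReplace_eq, pvSq_rep2]
  | case2 s h =>
    rw [pvStep3, dif_neg h]
    exact (pvSq_of_no_dd s (by rw [← pvIsIn_eq]; simpa using h)).symm

theorem pvSqA_pvSq (t : List Char) :
    pvSqA false t = pvSq t ∧ '.' :: pvSqA true t = pvSq ('.' :: t) := by
  induction t with
  | nil => exact ⟨rfl, by rw [pvSqA, pvSq]; simp [pvSq]⟩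
  | cons c u ih =>
    obtain ⟨ih1, ih2⟩ := ih
    constructor
    · rw [pvSqA]
      by_cases hc : c = '.'
      · subst hc
        rw [if_pos rfl, if_neg (by simp)]
        exact ih2
      · rw [if_neg hc, ih1, pvSq, if_neg (by simp [hc])]
    · rw [pvSqA]
      by_cases hc : c = '.'
      · subst hc
        rw [if_pos rfl, if_pos rfl]
        rw [show pvSq ('.' :: '.' :: u) = pvSq ('.' :: u) by rw [pvSq]; simp [pvSq]]
        exact ih2
      · rw [if_neg hc]
        rw [show pvSq ('.' :: c :: u) = '.' :: pvSq (c :: u) by rw [pvSq, if_neg (by simp [hc])]]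
        rw [show pvSq (c :: u) = c :: pvSq u by rw [pvSq, if_neg (by simp [hc])]]
        rw [ih1]

theorem pvIsIn_pair (c : Char) : PySem.Chars.isIn [c] ['-', '_'] = (c == '-' || c == '_') := by
  by_cases h : c = '-' ∨ c = '_'
  · rw [(PySem.Chars.isIn_iff_infix _ _).mpr
      (by rcases h with rfl | rfl
          · exact ⟨[], ['_'], rfl⟩
          · exact ⟨['-'], [], rfl⟩)]
    rcases h with rfl | rfl <;> simp
  · rw [not_or] at h
    rw [show (c == '-' || c == '_') = false by simp [h.1, h.2]]
    rw [PySem.Chars.isIn_eq_false_iff _ _]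
    rintro ⟨pre, post, hpre⟩
    have hc : c ∈ (['-', '_'] : List Char) := by
      rw [← hpre]; simp
    simp at hc
    rcases hc with rfl | rfl
    · exact h.1 rfl
    · exact h.2 rfl

theorem pvScan_eq (l : List Char) : ∀ acc,
    l.foldl pvScanStep acc = acc ++ pvSqA (acc.getLast? == some '.') (l.filter pvKeep) := by
  induction l with
  | nil => intro acc; simp [pvSqA]
  | cons c l ih =>
    intro acc
    simp only [List.foldl_cons]
    by_cases hk : pvKeep c = true
    · by_cases hc : c = '.'
      · subst hc
        have hstep1 : (PySem.Chars.isalnum '.' || PySem.Chars.isIn ['.'] ['-', '_']) = false := by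
          rw [pvIsIn_pair]; decide
        by_cases hd : acc.getLast? = some '.'
        · have hne : acc ≠ [] := by
            intro h; subst h; simp at hd
          have : pvScanStep acc '.' = acc := by
            rw [pvScanStep, if_neg (by simp [hstep1])]
            rw [if_neg (by simp [hd, hne])]
          rw [this, ih acc]
          rw [List.filter_cons, if_pos hk]
          rw [show (acc.getLast? == some '.') = true by simp [hd]]
          rw [pvSqA, if_pos rfl, if_pos rfl]
        · have : pvScanStep acc '.' = acc ++ ['.'] := by
            rw [pvScanStep, if_neg (by simp [hstep1])]
            rw [if_pos (by simp [hd])]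
          rw [this, ih (acc ++ ['.'])]
          rw [List.filter_cons, if_pos hk]
          rw [show (acc.getLast? == some '.') = false by simp [hd]]
          rw [show ((acc ++ ['.']).getLast? == some '.') = true by simp]
          rw [pvSqA, if_pos rfl, if_neg (by simp)]
          simp
      · have halnum : (PySem.Chars.isalnum c || PySem.Chars.isIn [c] ['-', '_']) = true := by
          rw [pvIsIn_pair]
          have := hk
          simp [pvKeep] at this
          rcases this with h | h
          · simp [h]
          · rcases h with rfl | rfl | rfl
            · simp
            · simp
            · exact absurd rfl hc
        have : pvScanStep acc c = acc ++ [c] := by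
          rw [pvScanStep, if_pos halnum]
        rw [this, ih (acc ++ [c])]
        rw [List.filter_cons, if_pos hk]
        rw [show ((acc ++ [c]).getLast? == some '.') = false by simp [hc]]
        rw [pvSqA, if_neg hc]
        simp
    · simp only [Bool.not_eq_true] at hk
      have hc : c ≠ '.' := by
        intro h; subst h
        rw [show pvKeep '.' = true by decide] at hk
        exact Bool.noConfusion hk
      have halnum : (PySem.Chars.isalnum c || PySem.Chars.isIn [c] ['-', '_']) = false := by
        rw [pvIsIn_pair]
        cases h1 : PySem.Chars.isalnum c
        · cases h2 : (c == '-' || c == '_')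
          · simp
          · exfalso
            have : pvKeep c = true := by
              simp only [Bool.or_eq_true, beq_iff_eq] at h2
              rcases h2 with rfl | rfl <;> decide
            rw [this] at hk; exact Bool.noConfusion hk
        · exfalso
          have : pvKeep c = true := by simp [pvKeep, h1]
          rw [this] at hk; exact Bool.noConfusion hk
      have : pvScanStep acc c = acc := by
        rw [pvScanStep, if_neg (by simp [halnum]), if_neg (by simp [hc])]
      rw [this, ih acc, List.filter_cons, if_neg (by simp [hk])]

-- the common value of both pipelines after filtering and dot-collapsing
theorem pvStage3_common (L : List Char) :
    pvStep3 (pvDeqLoop L.length L) = L.foldl pvScanStep [] ∧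
    L.foldl pvScanStep [] = pvSq (L.filter pvKeep) := by
  have hA : pvDeqLoop L.length L = L.filter pvKeep := by
    have := pvDeqLoop_eq L []
    simpa using this
  have hB : L.foldl pvScanStep [] = pvSq (L.filter pvKeep) := by
    rw [pvScan_eq L []]
    simp only [List.getLast?_nil]
    rw [show ((none : Option Char) == some '.') = false by rfl]
    rw [(pvSqA_pvSq (L.filter pvKeep)).1]
    simp
  refine ⟨?_, hB⟩
  rw [hA, pvStep3_eq, hB]

-- ===== VERDICT (by name: the statement is the Claim_ definition above) =====
theorem solution_spec : Claim_equal_solution := by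
  intro new_id _
  show solution new_id = solution_alt new_id
  obtain ⟨h1, _⟩ := pvStage3_common (PySem.Chars.lower new_id.toList)
  simp only [solution, solution_alt]
  rw [h1]
  set s : List Char := (PySem.Chars.lower new_id.toList).foldl pvScanStep [] with hs
  clear h1 hs
  -- step 4 first if
  rw [show (s.length != 0 && (PySem.List.pyGet? s 0 == some '.')) = (!s.isEmpty && (s.head? == some '.')) by
    rw [PySem.List.pyGet?_zero]
    cases s <;> simp]
  rw [PySem.List.slice_from_one]
  set s4 := if (!s.isEmpty && (s.head? == some '.')) = true then s.tail else s with hs4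
  clear hs4
  -- step 4 second if
  rw [show (s4.length != 0 && (PySem.List.pyGet? s4 (-1) == some '.')) = (!s4.isEmpty && (s4.getLast? == some '.')) by
    rw [PySem.List.pyGet?_neg_one]
    cases s4 <;> simp]
  rw [PySem.List.slice_to_neg_one]
  set s5 := if (!s4.isEmpty && (s4.getLast? == some '.')) = true then s4.dropLast else s4 with hs5
  clear hs5
  -- step 5
  rw [show (s5.length == 0) = s5.isEmpty by cases s5 <;> simp]
  set s6 := if s5.isEmpty = true then ['a'] else s5 with hs6
  clear hs6
  -- step 6
  rw [show PySem.List.slice s6 none (some 15) = s6.take 15 by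
    rw [PySem.List.slice_to s6 (by norm_num), show ((15:Int)).toNat = 15 from rfl]]
  rw [PySem.List.pyGet?_neg_one, PySem.List.slice_to_neg_one]
  set s7 := if 16 ≤ s6.length then
      (let t := s6.take 15
       if (t.getLast? == some '.') = true then t.dropLast else t)
    else s6 with hs7
  clear hs7
  -- step 7
  by_cases h7 : s7.length ≤ 2
  · rw [if_pos h7, if_pos h7]
    rw [PySem.List.pyGet?_neg_one]
    rw [PySem.List.pyRepeat_singleton]
    rw [show ((3 : Int) - (s7.length : Int)).toNat = 3 - s7.length by omega]
    rw [List.getLastD_eq_getLast?]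
  · rw [if_neg h7, if_neg h7]
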